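-- pv_equiv track=rewrite | github.com/nvmexp/lw_firmware | src/pmu/build/VFieldTableGenerator/vfield_util/util.py | groupChipsByVfieldTbl
-- ===== SOURCE A (Python) =====
-- def groupChipsByVfieldTbl(chips):
--     groups = {}
--     for chip, chipVfieldTbl in chips.items():
--         tup = tuple(sorted(chipVfieldTbl.items()))
--         if tup in groups:
--             groups[tup].append(chip)
--         else:
--             groups[tup] = [chip]
--
--     return groups
-- ===== SOURCE B (Python) =====
-- def groupChipsByVfieldTbl(chips):
--     rest = [(tuple(sorted(tbl.items())), chip) for chip, tbl in chips.items()]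
--     groups = {}
--     while rest:
--         key = rest[0][0]
--         groups[key] = [chip for k, chip in rest if k == key]
--         rest = [(k, chip) for k, chip in rest if k != key]
--     return groups
-- ===== Notes on version B (the rewrite author's own statement) =====
-- stated objective: alternative
-- what changed: Replaces A's incremental dict accumulation (per-chip membership test and append into a growing bucket) by repeated whole-list partitioning: precompute (canonical key, chip) pairs, then peel off the first remaining key's entire equivalence class with a filter and recurse on the complement until the list is empty.
import Mathlib
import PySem

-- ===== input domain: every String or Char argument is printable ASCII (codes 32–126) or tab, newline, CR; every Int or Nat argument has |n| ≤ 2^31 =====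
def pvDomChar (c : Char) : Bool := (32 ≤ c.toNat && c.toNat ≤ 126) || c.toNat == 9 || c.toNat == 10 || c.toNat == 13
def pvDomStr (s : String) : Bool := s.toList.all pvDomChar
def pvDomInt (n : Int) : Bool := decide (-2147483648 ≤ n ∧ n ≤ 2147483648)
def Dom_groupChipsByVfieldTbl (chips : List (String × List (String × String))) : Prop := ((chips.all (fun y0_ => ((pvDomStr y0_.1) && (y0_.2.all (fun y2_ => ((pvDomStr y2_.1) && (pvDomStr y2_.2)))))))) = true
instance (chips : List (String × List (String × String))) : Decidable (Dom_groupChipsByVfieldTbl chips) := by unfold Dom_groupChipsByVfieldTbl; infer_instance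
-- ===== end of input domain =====

-- B replaces A's incremental dict accumulation (membership test + append per chip) by
-- repeated whole-list partitioning: peel off the first remaining key's whole class with a
-- filter, recurse on the complement (objective: alternative decomposition, same cost class).

-- ===== PORT A =====
-- tuple(sorted(chipVfieldTbl.items())): Python sorts the (key, value) string pairs
-- lexicographically = sorted2 with the two components as keys.
def groupChipsByVfieldTbl (chips : List (String × List (String × String))) : List (List (String × String) × List String) :=
  (chips.foldl
    (fun (groups : PySem.Dict (List (String × String)) (List String)) p =>
      let tup := PySem.List.sorted2 p.2 Prod.fst Prod.snd false
      if groups.contains tup then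
        groups.modify tup [] (fun v => v ++ [p.1])
      else
        groups.insert tup [p.1])
    PySem.Dict.empty).items

-- ===== PORT B =====
-- the `while rest:` loop of Source B; each pass extracts the first key's whole class
-- (`groups[key] = [chip for k, chip in rest if k == key]`) and keeps the complement.
def pvGroupLoop (rest : List (List (String × String) × String))
    (groups : PySem.Dict (List (String × String)) (List String)) :
    PySem.Dict (List (String × String)) (List String) :=
  match rest with
  | [] => groups
  | p :: t =>
    pvGroupLoop ((p :: t).filter (fun q => q.1 != p.1))
      (groups.insert p.1 (((p :: t).filter (fun q => q.1 == p.1)).map Prod.snd))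
termination_by rest.length
decreasing_by
  simp only [List.filter_cons, bne_self_eq_false, List.length_cons]
  exact Nat.lt_succ_of_le (List.length_filter_le _ _)

def groupChipsByVfieldTbl_alt (chips : List (String × List (String × String))) : List (List (String × String) × List String) :=
  let rest := chips.map (fun p => (PySem.List.sorted2 p.2 Prod.fst Prod.snd false, p.1))
  (pvGroupLoop rest PySem.Dict.empty).items

-- ===== PRECONDITION & SPEC =====
def Spec_groupChipsByVfieldTbl (chips : List (String × List (String × String))) (out : List (List (String × String) × List String)) : Prop := out = groupChipsByVfieldTbl_alt chips
instance (chips : List (String × List (String × String))) (out : List (List (String × String) × List String)) : Decidable (Spec_groupChipsByVfieldTbl chips out) := by unfold Spec_groupChipsByVfieldTbl; infer_instance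

-- ===== CLAIM (what is proved, stated in full; the proofs are below) =====
def Claim_equal_groupChipsByVfieldTbl : Prop := ∀ (chips : List (String × List (String × String))), Dom_groupChipsByVfieldTbl chips → Spec_groupChipsByVfieldTbl chips (groupChipsByVfieldTbl chips)

-- ===== LEMMAS AND PROOFS =====

-- A's if/else step is exactly `modify` with default []: when the key is absent,
-- modify inserts f([]) = [chip].
theorem step_eq (d : PySem.Dict (List (String × String)) (List String))
    (k : List (String × String)) (c : String) :
    (if d.contains k then d.modify k [] (fun v => v ++ [c]) else d.insert k [c])
      = d.modify k [] (fun v => v ++ [c]) := by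
  by_cases h : d.contains k = true
  · simp [h]
  · simp only [Bool.not_eq_true] at h
    simp [h, PySem.Dict.modify, PySem.Dict.getD_of_not_contains _ [] h]

-- Set.add of a member is a no-op
theorem add_of_mem {α : Type} [BEq α] [LawfulBEq α] (s : PySem.Set α) (x : α) (h : x ∈ s) :
    PySem.Set.add s x = s := by
  simp [PySem.Set.add, PySem.Set.contains, h]

-- a fold of Set.add over xs ignores elements already present in the accumulator
theorem foldl_add_filter_ne {α : Type} [BEq α] [LawfulBEq α] (x : α) (xs : List α) :
    ∀ (s : PySem.Set α), x ∈ s →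
      xs.foldl PySem.Set.add s = (xs.filter (fun y => y != x)).foldl PySem.Set.add s := by
  induction xs with
  | nil => intro s _; rfl
  | cons y ys ih =>
    intro s hx
    by_cases hy : y = x
    · subst hy
      simp only [List.foldl_cons, List.filter_cons, bne_self_eq_false, add_of_mem s y hx]
      exact ih s hx
    · have hmem : x ∈ PySem.Set.add s y := by
        simp only [PySem.Set.add]
        split <;> simp [hx]
      simp only [List.foldl_cons, List.filter_cons]
      rw [if_pos (by simp [bne, hy] : ((y != x) = true))]
      simp only [List.foldl_cons]
      exact ih (PySem.Set.add s y) hmem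
  -- (the filter keeps y since y ≠ x)

-- a head element no later element equals passes through the fold untouched
theorem foldl_add_cons_of_ne {α : Type} [BEq α] [LawfulBEq α] (x : α) (xs : List α) :
    ∀ (s : PySem.Set α), (∀ y ∈ xs, y ≠ x) →
      xs.foldl PySem.Set.add (x :: s) = x :: xs.foldl PySem.Set.add s := by
  induction xs with
  | nil => intro s _; rfl
  | cons y ys ih =>
    intro s h
    have hyx : y ≠ x := h y (by simp)
    have hstep : PySem.Set.add (x :: s) y = x :: PySem.Set.add s y := by
      simp only [PySem.Set.add, PySem.Set.contains]
      by_cases hm : y ∈ s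
      · simp [hm, hyx]
      · simp [hm, hyx]
    simp only [List.foldl_cons, hstep]
    exact ih (PySem.Set.add s y) (fun z hz => h z (by simp [hz]))

-- ordered dedup of a cons: the head, then the dedup of the tail with the head removed
theorem dedup_cons {α : Type} [BEq α] [LawfulBEq α] (x : α) (xs : List α) :
    PySem.List.dedup (x :: xs) = x :: PySem.List.dedup (xs.filter (fun y => y != x)) := by
  have h1 : PySem.List.dedup (x :: xs) = xs.foldl PySem.Set.add [x] := by
    simp [PySem.List.dedup_eq_ofList, PySem.Set.ofList_eq_foldl, PySem.Set.add,
      PySem.Set.contains]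
  have h2 : PySem.List.dedup (xs.filter (fun y => y != x))
      = (xs.filter (fun y => y != x)).foldl PySem.Set.add [] := by
    simp [PySem.List.dedup_eq_ofList, PySem.Set.ofList_eq_foldl]
  rw [h1, h2, foldl_add_filter_ne x xs [x] (by simp)]
  exact foldl_add_cons_of_ne x _ [] (fun y hy => by
    have := List.of_mem_filter hy
    simpa [bne] using this)

-- the partition loop, characterised: it appends one bucket per distinct key, in
-- first-occurrence order, each bucket holding that key's chips in order.
theorem pvGroupLoop_items (n : Nat) :
    ∀ (l : List (List (String × String) × String)), l.length ≤ n →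
    ∀ (d : PySem.Dict (List (String × String)) (List String)),
      (∀ q ∈ l, d.contains q.1 = false) →
      (pvGroupLoop l d).items
        = d.items ++ (PySem.List.dedup (l.map Prod.fst)).map
            (fun k => (k, (l.filter (fun q => q.1 == k)).map Prod.snd)) := by
  induction n with
  | zero =>
    intro l hl d _
    have : l = [] := List.eq_nil_of_length_eq_zero (Nat.le_zero.mp hl)
    subst this
    simp [pvGroupLoop, PySem.List.dedup_eq_ofList, PySem.Set.ofList]
  | succ n ih =>
    intro l hl d hd
    match l with
    | [] => simp [pvGroupLoop, PySem.List.dedup_eq_ofList, PySem.Set.ofList]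
    | p :: t =>
      rw [pvGroupLoop]
      have hrest : (p :: t).filter (fun q => q.1 != p.1) = t.filter (fun q => q.1 != p.1) := by
        simp
      have hlen : (t.filter (fun q => q.1 != p.1)).length ≤ n :=
        le_trans (List.length_filter_le _ _) (Nat.lt_succ_iff.mp (lt_of_lt_of_le (by simp) hl))
      have hfresh : ∀ q ∈ t.filter (fun q => q.1 != p.1),
          (d.insert p.1 (((p :: t).filter (fun q => q.1 == p.1)).map Prod.snd)).contains q.1 = false := by
        intro q hq
        have hne : q.1 ≠ p.1 := by
          have := List.of_mem_filter hq
          simpa [bne] using this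
        have hmem : q ∈ (p :: t) := by
          exact List.mem_cons_of_mem _ (List.mem_of_mem_filter hq)
        rw [PySem.Dict.contains_insert]
        simp [hne, hd q hmem]
      rw [hrest, ih _ hlen _ hfresh]
      rw [PySem.Dict.items_insert_of_not_contains _ _ (hd p (by simp))]
      -- now align the dedup/map structure
      have hmapfst : (t.filter (fun q => q.1 != p.1)).map Prod.fst
          = (t.map Prod.fst).filter (fun k => k != p.1) := by
        rw [List.filter_map]; rfl
      have hded : PySem.List.dedup ((p :: t).map Prod.fst)
          = p.1 :: PySem.List.dedup ((t.map Prod.fst).filter (fun k => k != p.1)) := by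
        simp only [List.map_cons]
        exact dedup_cons p.1 (t.map Prod.fst)
      rw [hmapfst, hded, List.map_cons, List.append_assoc, List.singleton_append]
      congr 1
      congr 1
      -- remaining buckets: for k ≠ p.1 the two filters agree
      refine List.map_congr_left (fun k hk => ?_)
      ·
        have hkne : k ≠ p.1 := by
          have hmem := (PySem.List.mem_dedup _ _).1 hk
          have := List.of_mem_filter hmem
          simpa [bne] using this
        have hfil : (t.filter (fun q => q.1 != p.1)).filter (fun q => q.1 == k)
            = (p :: t).filter (fun q => q.1 == k) := by
          rw [List.filter_filter, List.filter_cons,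
            if_neg (by simp [Ne.symm hkne])]
          refine List.filter_congr (fun q _ => ?_)
          by_cases hq : q.1 = k
          · simp [hq, bne, hkne]
          · simp [hq]
        rw [hfil]

-- both ports compute the same items list
theorem groupChips_eq (chips : List (String × List (String × String))) :
    groupChipsByVfieldTbl chips = groupChipsByVfieldTbl_alt chips := by
  unfold groupChipsByVfieldTbl groupChipsByVfieldTbl_alt
  simp only []
  set keyed := chips.map (fun p => (PySem.List.sorted2 p.2 Prod.fst Prod.snd false, p.1)) with hkeyed
  -- ===== A side: normalise to a modify-fold over `keyed` =====
  have h1 : (chips.foldl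
      (fun (groups : PySem.Dict (List (String × String)) (List String)) p =>
        if groups.contains (PySem.List.sorted2 p.2 Prod.fst Prod.snd false) then
          groups.modify (PySem.List.sorted2 p.2 Prod.fst Prod.snd false) [] (fun v => v ++ [p.1])
        else
          groups.insert (PySem.List.sorted2 p.2 Prod.fst Prod.snd false) [p.1])
      PySem.Dict.empty)
    = (keyed.foldl
      (fun (d : PySem.Dict (List (String × String)) (List String)) q =>
        d.modify q.1 [] (fun v => v ++ [q.2]))
      PySem.Dict.empty) := by
    rw [PySem.List.foldl_congr_mem _ _ _ _ (fun acc x _ => step_eq acc _ x.1), hkeyed]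
    exact (List.foldl_map
      (f := fun (p : String × List (String × String)) => (PySem.List.sorted2 p.2 Prod.fst Prod.snd false, p.1))
      (g := fun (d : PySem.Dict (List (String × String)) (List String)) q => d.modify q.1 [] (fun v => v ++ [q.2]))
      (l := chips) (init := PySem.Dict.empty)).symm
  rw [h1]
  set A := keyed.foldl
      (fun (d : PySem.Dict (List (String × String)) (List String)) q =>
        d.modify q.1 [] (fun v => v ++ [q.2])) PySem.Dict.empty with hA
  have hAkeys : A.keys = PySem.List.dedup (keyed.map Prod.fst) := by
    rw [hA, PySem.Dict.keys_foldl_modify_key keyed Prod.fst [] (fun _ q v => v ++ [q.2])]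
    simp [PySem.Set.update, PySem.Set.ofList, PySem.List.dedup_eq_ofList]
  have hAnd : A.keys.Nodup := by
    rw [hA]
    exact PySem.Dict.nodup_keys_foldl_modify_key keyed Prod.fst [] (fun _ q v => v ++ [q.2])
      PySem.Dict.empty (by simp)
  rw [PySem.Dict.items_eq_map_keys A hAnd [], hAkeys]
  -- ===== B side: the partition loop's characterisation =====
  rw [pvGroupLoop_items keyed.length keyed (le_refl _) PySem.Dict.empty (by simp)]
  simp only [PySem.Dict.empty, List.nil_append]
  refine List.map_congr_left (fun k _ => ?_)
  have hAget : A.getD k [] = (keyed.filter (fun p => p.1 == k)).map (fun x => x.2) := by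
    rw [hA, PySem.Dict.getD_foldl_modify_append keyed PySem.Dict.empty k]
    simp
  rw [hAget]

-- ===== VERDICT (by name: the statement is the Claim_ definition above) =====
theorem groupChipsByVfieldTbl_spec : Claim_equal_groupChipsByVfieldTbl := by
  intro chips _
  unfold Spec_groupChipsByVfieldTbl
  exact groupChips_eq chips
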